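-- pv_equiv track=rewrite | github.com/alexander-stage-hoco/project-caldera | src/tools/git-sizer/scripts/analyze.py | calculate_threshold_level
-- ===== SOURCE A (Python) =====
-- def calculate_threshold_level(metric: str, value: int) -> int:
--     """Calculate threshold level (0-4 stars) based on git-sizer thresholds."""
--     thresholds = {
--         "max_blob_size": [
--             (1 * 1024 * 1024, 1),    # 1 MiB = *
--             (10 * 1024 * 1024, 2),   # 10 MiB = **
--             (50 * 1024 * 1024, 3),   # 50 MiB = ***
--             (100 * 1024 * 1024, 4),  # 100 MiB = !!!!
--         ],
--         "blob_total_size": [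
--             (100 * 1024 * 1024, 1),   # 100 MiB = *
--             (500 * 1024 * 1024, 2),   # 500 MiB = **
--             (1024 * 1024 * 1024, 3),  # 1 GiB = ***
--             (5 * 1024 * 1024 * 1024, 4),  # 5 GiB = !!!!
--         ],
--         "commit_count": [
--             (10000, 1),   # 10k = *
--             (50000, 2),   # 50k = **
--             (200000, 3),  # 200k = ***
--             (1000000, 4), # 1M = !!!!
--         ],
--         "max_tree_entries": [
--             (1000, 1),    # 1k = *
--             (5000, 2),    # 5k = **
--             (10000, 3),   # 10k = ***
--             (50000, 4),   # 50k = !!!!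
--         ],
--         "max_history_depth": [
--             (10000, 1),   # 10k = *
--             (50000, 2),   # 50k = **
--             (200000, 3),  # 200k = ***
--             (500000, 4),  # 500k = !!!!
--         ],
--         "max_path_depth": [
--             (10, 1),   # 10 = *
--             (15, 2),   # 15 = **
--             (20, 3),   # 20 = ***
--             (30, 4),   # 30 = !!!!
--         ],
--         "expanded_blob_count": [
--             (10000, 1),   # 10k = *
--             (50000, 2),   # 50k = **
--             (100000, 3),  # 100k = ***
--             (500000, 4),  # 500k = !!!!
--         ],
--     }
--
--     if metric not in thresholds:
--         return 0
--
--     for threshold, level in thresholds[metric]: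
--         if value >= threshold:
--             continue
--         else:
--             return max(0, level - 1)
--
--     return 4
-- ===== SOURCE B (Python) =====
-- _BOUNDS = {
--     "max_blob_size": [1048576, 10485760, 52428800, 104857600],
--     "blob_total_size": [104857600, 524288000, 1073741824, 5368709120],
--     "commit_count": [10000, 50000, 200000, 1000000],
--     "max_tree_entries": [1000, 5000, 10000, 50000],
--     "max_history_depth": [10000, 50000, 200000, 500000],
--     "max_path_depth": [10, 15, 20, 30],
--     "expanded_blob_count": [10000, 50000, 100000, 500000],
-- }
--
--
-- def calculate_threshold_level(metric: str, value: int) -> int: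
--     """The star level is simply how many of the metric's ascending
--     boundaries the value has reached."""
--     bounds = _BOUNDS.get(metric)
--     if bounds is None:
--         return 0
--     return sum(1 for b in bounds if value >= b)
-- ===== Notes on version B (the rewrite author's own statement) =====
-- stated objective: simpler
-- what changed: B drops the (threshold, level) pairs and the early-exit scan with max(0, level-1): it stores plain ascending boundary lists and returns the count of boundaries <= value, which equals A's level since levels are 1..4 in order.
import Mathlib
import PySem

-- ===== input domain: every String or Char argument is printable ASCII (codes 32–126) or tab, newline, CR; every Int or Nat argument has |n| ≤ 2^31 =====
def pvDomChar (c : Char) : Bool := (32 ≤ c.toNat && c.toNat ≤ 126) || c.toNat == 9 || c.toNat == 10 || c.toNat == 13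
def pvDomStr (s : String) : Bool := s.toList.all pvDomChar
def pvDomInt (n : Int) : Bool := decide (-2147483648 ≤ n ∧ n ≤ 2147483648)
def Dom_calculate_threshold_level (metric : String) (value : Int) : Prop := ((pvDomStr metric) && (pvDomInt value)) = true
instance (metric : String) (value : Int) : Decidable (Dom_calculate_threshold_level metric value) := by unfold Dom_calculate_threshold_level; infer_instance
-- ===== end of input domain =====

-- B replaces A's early-exit scan over (threshold, level) pairs by counting how many ascending boundaries the value has reached.

-- ===== PORT A =====
-- A's threshold table: metric -> list of (threshold, level) pairs.
def pvThresholdsA : PySem.Dict String (List (Int × Int)) :=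
  PySem.Dict.mk [
    ("max_blob_size", [(1048576, 1), (10485760, 2), (52428800, 3), (104857600, 4)]),
    ("blob_total_size", [(104857600, 1), (524288000, 2), (1073741824, 3), (5368709120, 4)]),
    ("commit_count", [(10000, 1), (50000, 2), (200000, 3), (1000000, 4)]),
    ("max_tree_entries", [(1000, 1), (5000, 2), (10000, 3), (50000, 4)]),
    ("max_history_depth", [(10000, 1), (50000, 2), (200000, 3), (500000, 4)]),
    ("max_path_depth", [(10, 1), (15, 2), (20, 3), (30, 4)]),
    ("expanded_blob_count", [(10000, 1), (50000, 2), (100000, 3), (500000, 4)])]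

-- A's for-loop: continue past reached thresholds, return max(0, level-1) at the first
-- miss, return 4 after the loop.
def pvScanA (value : Int) : List (Int × Int) → Int
  | [] => 4
  | (threshold, level) :: rest =>
      if value ≥ threshold then pvScanA value rest else max 0 (level - 1)

def calculate_threshold_level (metric : String) (value : Int) : Int :=
  match pvThresholdsA.get? metric with
  | none => 0
  | some pairs => pvScanA value pairs

-- ===== PORT B =====
-- B's table: metric -> ascending boundary list.
def pvBoundsB : PySem.Dict String (List Int) :=
  PySem.Dict.mk [
    ("max_blob_size", [1048576, 10485760, 52428800, 104857600]),
    ("blob_total_size", [104857600, 524288000, 1073741824, 5368709120]),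
    ("commit_count", [10000, 50000, 200000, 1000000]),
    ("max_tree_entries", [1000, 5000, 10000, 50000]),
    ("max_history_depth", [10000, 50000, 200000, 500000]),
    ("max_path_depth", [10, 15, 20, 30]),
    ("expanded_blob_count", [10000, 50000, 100000, 500000])]

def calculate_threshold_level_alt (metric : String) (value : Int) : Int :=
  match pvBoundsB.get? metric with
  | none => 0
  | some bounds => (bounds.countP (fun b => value ≥ b) : Int)

-- ===== PRECONDITION & SPEC =====
def Spec_calculate_threshold_level (metric : String) (value : Int) (out : Int) : Prop := out = calculate_threshold_level_alt metric value
instance (metric : String) (value : Int) (out : Int) : Decidable (Spec_calculate_threshold_level metric value out) := by unfold Spec_calculate_threshold_level; infer_instance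

-- ===== CLAIM (what is proved, stated in full; the proofs are below) =====
def Claim_equal_calculate_threshold_level : Prop := ∀ (metric : String) (value : Int), Dom_calculate_threshold_level metric value → Spec_calculate_threshold_level metric value (calculate_threshold_level metric value)

-- ===== LEMMAS AND PROOFS =====

-- On one ascending 4-row table, A's early-exit scan equals B's count of reached boundaries.
theorem pvScanA_eq_countP (v t1 t2 t3 t4 : Int) (h12 : t1 ≤ t2) (h23 : t2 ≤ t3) (h34 : t3 ≤ t4) :
    pvScanA v [(t1, 1), (t2, 2), (t3, 3), (t4, 4)] =
      (([t1, t2, t3, t4].countP (fun b => v ≥ b) : Nat) : Int) := by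
  simp only [pvScanA, List.countP_cons, List.countP_nil, decide_eq_true_eq, ge_iff_le]
  push_cast
  split_ifs <;> omega

-- ===== VERDICT (by name: the statement is the Claim_ definition above) =====
theorem calculate_threshold_level_spec : Claim_equal_calculate_threshold_level := by
  intro metric value _
  unfold Spec_calculate_threshold_level calculate_threshold_level calculate_threshold_level_alt
  unfold pvThresholdsA pvBoundsB
  simp only [PySem.Dict.get?_mk_cons]
  split_ifs <;>
    first
      | rfl
      | exact pvScanA_eq_countP value _ _ _ _ (by norm_num) (by norm_num) (by norm_num)
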